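-- pv_equiv track=rewrite | github.com/Kevinrobot34/atcoder | others/codefestival_2014_final/c.py | func
-- ===== SOURCE A (Python) =====
-- def func(n):
--     base = n
--     x = 1
--     res = 0
--     while n:
--         res += x * (n % 10)
--         x *= base
--         n //= 10
--     return res
-- ===== SOURCE B (Python) =====
-- def func(n):
--     # Horner's rule over the decimal digits of n, most-significant first.
--     res = 0
--     for ch in str(n):
--         res = res * n + ord(ch) - 48
--     return res
-- ===== Notes on version B (the rewrite author's own statement) =====
-- stated objective: idiomatic
-- what changed: Replaces the divmod loop with its power accumulator x by a single Horner fold over the decimal string str(n), traversing digits most-significant-first; Pre_ excludes n < 0, where A's while loop never terminates (n//10 stalls at -1).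
-- outside the precondition, e.g. on func(-5): A does not finish within the time limit, B returns 20
import Mathlib
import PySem

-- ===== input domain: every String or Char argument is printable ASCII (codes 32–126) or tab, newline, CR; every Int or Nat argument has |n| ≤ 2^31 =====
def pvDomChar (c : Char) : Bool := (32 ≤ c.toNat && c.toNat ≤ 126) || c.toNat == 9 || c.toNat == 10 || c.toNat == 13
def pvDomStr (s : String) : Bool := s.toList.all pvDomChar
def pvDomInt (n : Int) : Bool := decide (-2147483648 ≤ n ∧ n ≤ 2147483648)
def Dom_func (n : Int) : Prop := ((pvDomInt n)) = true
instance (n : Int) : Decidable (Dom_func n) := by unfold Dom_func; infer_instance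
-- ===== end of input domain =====

-- B replaces A's divmod loop with its power accumulator by a single Horner fold over str(n);
-- objective: idiomatic (same asymptotic cost).

-- ===== PORT A =====
-- A's while loop; the guard 'n ≤ 0' (instead of 'n ≠ 0') only totalizes the port: on n < 0
-- the Python loop never terminates, and such n are outside Pre_func.
def funcLoop (n base x res : Int) : Int :=
  if n ≤ 0 then res
  else funcLoop (PySem.Int.floordiv n 10) base (x * base) (res + x * (PySem.Int.mod n 10))
termination_by n.toNat
decreasing_by
  rename_i h
  have h10 : (0:Int) < 10 := by norm_num
  rw [PySem.Int.floordiv_eq_ediv_of_pos h10]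
  omega

def func (n : Int) : Int := funcLoop n n 1 0

-- ===== PORT B =====
-- res = 0; for ch in str(n): res = res * n + ord(ch) - 48
def func_alt (n : Int) : Int :=
  (PySem.Int.toStr n).toList.foldl (fun res c => res * n + (c.toNat : Int) - 48) 0

-- ===== PRECONDITION & SPEC =====
-- Pre_ excludes n < 0: there A's 'while n: ... n //= 10' never reaches 0 (it stalls at -1),
-- so the Python A never returns on negative input.
def Pre_func (n : Int) : Prop := 0 ≤ n
instance (n : Int) : Decidable (Pre_func n) := by unfold Pre_func; infer_instance
def pvWitness_func : Int := (5)

def Spec_func (n : Int) (out : Int) : Prop := out = func_alt n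
instance (n : Int) (out : Int) : Decidable (Spec_func n out) := by unfold Spec_func; infer_instance

-- ===== CLAIM (what is proved, stated in full; the proofs are below) =====
def Claim_equal_func : Prop := ∀ (n : Int), Dom_func n → Pre_func n → Spec_func n (func n)

-- ===== LEMMAS AND PROOFS =====

-- Σ dᵢ·baseⁱ over the decimal digits of m (least-significant recursion).
def polyVal (base : Int) (m : Nat) : Int :=
  if m = 0 then 0 else ((m % 10 : Nat) : Int) + base * polyVal base (m / 10)
decreasing_by exact Nat.div_lt_self (Nat.pos_of_ne_zero (by assumption)) (by norm_num)

-- A's loop computes res + x * polyVal base m.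
theorem funcLoop_eq (base : Int) : ∀ (m : Nat) (x res : Int),
    funcLoop (m : Int) base x res = res + x * polyVal base m := by
  intro m
  induction m using Nat.strong_induction_on with
  | _ m ih =>
    intro x res
    rw [funcLoop, polyVal]
    by_cases h0 : m = 0
    · simp [h0]
    · have hm : ¬ ((m : Int) ≤ 0) := by omega
      have hfd : PySem.Int.floordiv (m : Int) 10 = ((m / 10 : Nat) : Int) := by
        rw [PySem.Int.floordiv_eq_ediv_of_pos (by norm_num)]; omega
      have hmd : PySem.Int.mod (m : Int) 10 = ((m % 10 : Nat) : Int) := by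
        rw [PySem.Int.mod_eq_emod_of_pos (by norm_num)]; omega
      simp only [hm, h0, hfd, hmd, ite_false]
      rw [ih (m / 10) (Nat.div_lt_self (Nat.pos_of_ne_zero h0) (by norm_num))]
      ring

-- toDigitsCore accumulator lemma.
theorem toDigitsCore_acc (b : Nat) : ∀ (f n : Nat) (acc : List Char),
    Nat.toDigitsCore b f n acc = Nat.toDigitsCore b f n [] ++ acc := by
  intro f
  induction f with
  | zero => intro n acc; simp [Nat.toDigitsCore]
  | succ f ih =>
    intro n acc
    simp only [Nat.toDigitsCore]
    by_cases h : n / b = 0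
    · simp [h]
    · simp only [h, ite_false]
      rw [ih (n / b) [Nat.digitChar (n % b)], ih (n / b) (Nat.digitChar (n % b) :: acc),
        List.append_assoc]
      rfl

-- Fuel irrelevance: any fuel > n gives the same digit string (base ≥ 2).
theorem toDigitsCore_fuel (b : Nat) (hb : 2 ≤ b) : ∀ (f f' n : Nat), n < f → n < f' →
    Nat.toDigitsCore b f n [] = Nat.toDigitsCore b f' n [] := by
  intro f
  induction f with
  | zero => intro f' n h; omega
  | succ f ih =>
    intro f' n hf hf'
    cases f' with
    | zero => omega
    | succ f' =>
      simp only [Nat.toDigitsCore]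
      by_cases h : n / b = 0
      · simp [h]
      · have hn0 : 0 < n := Nat.pos_of_ne_zero (fun he => h (by simp [he]))
        have hnb : n / b < n := Nat.div_lt_self hn0 (by omega)
        have h1 : n / b < f := by omega
        have h2 : n / b < f' := by omega
        simp only [h, ite_false]
        rw [toDigitsCore_acc, toDigitsCore_acc b f']
        rw [ih f' (n / b) h1 h2]

theorem toDigits_small (b n : Nat) (hn : n < b) :
    Nat.toDigits b n = [Nat.digitChar n] := by
  simp [Nat.toDigits, Nat.toDigitsCore, Nat.div_eq_of_lt hn, Nat.mod_eq_of_lt hn]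

theorem toDigits_step (b n : Nat) (hb : 2 ≤ b) (hn : b ≤ n) :
    Nat.toDigits b n = Nat.toDigits b (n / b) ++ [Nat.digitChar (n % b)] := by
  have h : n / b ≠ 0 := by
    intro h
    have := Nat.lt_of_div_eq_zero (by omega) h
    omega
  have hnb : n / b < n := Nat.div_lt_self (by omega) (by omega)
  conv_lhs => rw [Nat.toDigits, Nat.toDigitsCore]
  simp only [h, ite_false]
  rw [toDigitsCore_acc]
  rw [Nat.toDigits]
  rw [toDigitsCore_fuel b hb n (n / b + 1) (n / b) hnb (Nat.lt_succ_self _)]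

theorem digitChar_toNat : ∀ k, k < 10 → (Nat.digitChar k).toNat = k + 48 := by decide

-- Horner fold over the decimal digit characters equals polyVal.
theorem horner_toDigits (base : Int) : ∀ (m : Nat),
    (Nat.toDigits 10 m).foldl (fun res c => res * base + (c.toNat : Int) - 48) 0
      = polyVal base m := by
  intro m
  induction m using Nat.strong_induction_on with
  | _ m ih =>
    by_cases h10 : 10 ≤ m
    · have hnb : m / 10 < m := Nat.div_lt_self (by omega) (by norm_num)
      rw [toDigits_step 10 m (by norm_num) h10, List.foldl_append, ih (m / 10) hnb]
      have hd : (Nat.digitChar (m % 10)).toNat = m % 10 + 48 :=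
        digitChar_toNat (m % 10) (Nat.mod_lt m (by norm_num))
      have hm0 : m ≠ 0 := by omega
      conv_rhs => rw [polyVal, if_neg hm0]
      simp only [List.foldl_cons, List.foldl_nil, hd]
      push_cast
      ring
    · rw [not_le] at h10
      rw [toDigits_small 10 m h10]
      by_cases h0 : m = 0
      · subst h0
        rw [polyVal, if_pos rfl]
        simp only [List.foldl_cons, List.foldl_nil]
        norm_num [Nat.digitChar]
        decide
      · have hd : (Nat.digitChar m).toNat = m + 48 := digitChar_toNat m h10
        have h1 : m / 10 = 0 := Nat.div_eq_of_lt h10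
        have h2 : m % 10 = m := Nat.mod_eq_of_lt h10
        conv_rhs => rw [polyVal, if_neg h0, h1, h2, polyVal, if_pos rfl]
        simp only [List.foldl_cons, List.foldl_nil, hd]
        push_cast
        ring

theorem func_alt_eq (n : Int) (hn : 0 ≤ n) : func_alt n = polyVal n n.toNat := by
  unfold func_alt
  rw [PySem.Int.toList_toStr]
  unfold PySem.Int.toChars
  have h : ¬ n < 0 := by omega
  simp only [h, ite_false]
  exact horner_toDigits n n.toNat

-- ===== VERDICT (by name: the statement is the Claim_ definition above) =====
theorem func_spec : Claim_equal_func := by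
  intro n _ hpre
  have hn : (0 : Int) ≤ n := hpre
  unfold Spec_func func
  rw [func_alt_eq n hn]
  obtain ⟨m, rfl⟩ : ∃ m : Nat, n = (m : Int) := ⟨n.toNat, by omega⟩
  rw [funcLoop_eq]
  simp
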